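-- pv_equiv track=rewrite | github.com/wiktorzakmateusz/AiSD | cwiczenia 4/Beap.py | find_last_full_el
-- ===== SOURCE A (Python) =====
-- def find_last_full_el(beap):
--     n = len(beap) - 1
--     sum = 0
--     i = 1
--     while sum + i <= n:
--         sum += i
--         i += 1
--
--
--     return sum
-- ===== SOURCE B (Python) =====
-- def find_last_full_el(beap):
--     # Binary search for the largest k with k*(k+1)//2 <= n, instead of
--     # summing 1+2+... step by step.  O(log n) iterations vs A's O(sqrt n).
--     n = len(beap) - 1
--     if n <= 0:
--         return 0
--     lo, hi = 0, n
--     while lo < hi: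
--         mid = (lo + hi + 1) // 2
--         if mid * (mid + 1) // 2 <= n:
--             lo = mid
--         else:
--             hi = mid - 1
--     return lo * (lo + 1) // 2
-- ===== Notes on version B (the rewrite author's own statement) =====
-- stated objective: faster
-- what changed: Replaces A's incremental summation 1+2+... (one loop iteration per level, O(sqrt n) iterations) with a binary search over k for the largest k with k(k+1)/2 <= n, returning k(k+1)/2 (O(log n) iterations).
import Mathlib
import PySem

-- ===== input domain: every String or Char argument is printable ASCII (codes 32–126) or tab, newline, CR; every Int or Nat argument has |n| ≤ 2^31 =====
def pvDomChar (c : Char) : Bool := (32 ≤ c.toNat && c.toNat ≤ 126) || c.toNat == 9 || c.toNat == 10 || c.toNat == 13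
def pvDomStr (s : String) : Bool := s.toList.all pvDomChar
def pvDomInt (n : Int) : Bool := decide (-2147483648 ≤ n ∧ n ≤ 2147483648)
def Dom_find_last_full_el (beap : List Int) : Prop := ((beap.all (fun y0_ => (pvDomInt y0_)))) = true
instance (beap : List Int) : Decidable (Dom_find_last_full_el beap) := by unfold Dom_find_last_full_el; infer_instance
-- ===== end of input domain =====

-- B replaces A's step-by-step summation with a binary search for the largest k
-- with k(k+1)/2 ≤ len(beap)-1; equivalence of the return values is proved below.

-- ===== PORT A =====
-- A's while loop: state (sum, i); sum and i are nonnegative throughout in Python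
-- (sum starts at 0, i at 1, both only grow), so they are carried as Nat.
def loopA (n : Int) (sum i : Nat) : Int :=
  if ((sum : Int) + (i : Int)) ≤ n then loopA n (sum + i) (i + 1) else (sum : Int)
termination_by (n + 1 - (sum : Int) - (i : Int)).toNat
decreasing_by omega

def find_last_full_el (beap : List Int) : Int :=
  loopA ((beap.length : Int) - 1) 0 1

-- ===== PORT B =====
-- B's binary-search loop: lo, hi stay in [0, n] (n ≥ 1), carried as Nat;
-- mid = (lo+hi+1)//2 and k*(k+1)//2 are floor divisions of nonnegatives, exact as Nat '/'.
def loopB (n : Int) (lo hi : Nat) : Int :=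
  if lo < hi then
    let mid := (lo + hi + 1) / 2
    if ((mid * (mid + 1) / 2 : Nat) : Int) ≤ n then loopB n mid hi
    else loopB n lo (mid - 1)
  else ((lo * (lo + 1) / 2 : Nat) : Int)
termination_by hi - lo
decreasing_by all_goals omega

def find_last_full_el_alt (beap : List Int) : Int :=
  let n : Int := (beap.length : Int) - 1
  if n ≤ 0 then 0 else loopB n 0 n.toNat

-- ===== PRECONDITION & SPEC =====
def Spec_find_last_full_el (beap : List Int) (out : Int) : Prop := out = find_last_full_el_alt beap
instance (beap : List Int) (out : Int) : Decidable (Spec_find_last_full_el beap out) := by unfold Spec_find_last_full_el; infer_instance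

-- ===== CLAIM (what is proved, stated in full; the proofs are below) =====
def Claim_equal_find_last_full_el : Prop := ∀ (beap : List Int), Dom_find_last_full_el beap → Spec_find_last_full_el beap (find_last_full_el beap)

-- ===== LEMMAS AND PROOFS =====

-- k-th triangular number
def T (k : Nat) : Nat := k * (k + 1) / 2

lemma two_T (k : Nat) : 2 * T k = k * (k + 1) := by
  have h : 2 ∣ k * (k + 1) := even_iff_two_dvd.mp (Nat.even_mul_succ_self k)
  unfold T
  omega

lemma T_succ (k : Nat) : T (k + 1) = T k + (k + 1) := by
  have h1 := two_T k
  have h2 := two_T (k + 1)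
  have h3 : (k + 1) * (k + 1 + 1) = k * (k + 1) + 2 * (k + 1) := by ring
  omega

lemma T_mono {j k : Nat} (h : j ≤ k) : T j ≤ T k := by
  have h1 := two_T j
  have h2 := two_T k
  have : j * (j + 1) ≤ k * (k + 1) := Nat.mul_le_mul h (by omega)
  omega

lemma T_le_self (k : Nat) : k ≤ T k := by
  have h1 := two_T k
  have h2 : 2 * k ≤ k * (k + 1) := by nlinarith
  omega

-- uniqueness of the sandwiched k
lemma T_sandwich_unique {n : Int} {j k : Nat}
    (h1 : (T j : Int) ≤ n) (h2 : n < (T (j + 1) : Int))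
    (h3 : (T k : Int) ≤ n) (h4 : n < (T (k + 1) : Int)) : j = k := by
  rcases Nat.lt_trichotomy j k with h | h | h
  · have := T_mono (show j + 1 ≤ k by omega)
    omega
  · exact h
  · have := T_mono (show k + 1 ≤ j by omega)
    omega

-- A's loop, from state (T j, j+1), returns the sandwiched triangular number
lemma loopA_sandwich : ∀ (n : Int) (sum i : Nat), ∀ j : Nat,
    sum = T j → i = j + 1 → (T j : Int) ≤ n →
    ∃ k : Nat, (T k : Int) ≤ n ∧ n < (T (k + 1) : Int) ∧ loopA n sum i = (T k : Int) := by
  intro n sum i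
  induction sum, i using loopA.induct n with
  | case1 sum i hle ih =>
    intro j hsum hi hTj
    rw [loopA, if_pos hle]
    have hnext : sum + i = T (j + 1) := by
      have := T_succ j
      omega
    exact ih (j + 1) hnext (by omega) (by rw [← hnext]; push_cast; exact hle)
  | case2 sum i hgt =>
    intro j hsum hi hTj
    rw [loopA, if_neg hgt]
    refine ⟨j, hTj, ?_, by rw [hsum]⟩
    have hTs := T_succ j
    rw [hsum, hi] at hgt
    push_cast at hgt ⊢
    omega

-- B's loop preserves the invariant T lo ≤ n < T (hi+1) and returns the sandwiched value
lemma loopB_sandwich : ∀ (n : Int) (lo hi : Nat),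
    (T lo : Int) ≤ n → n < (T (hi + 1) : Int) → lo ≤ hi →
    ∃ k : Nat, (T k : Int) ≤ n ∧ n < (T (k + 1) : Int) ∧ loopB n lo hi = (T k : Int) := by
  intro n lo hi
  induction lo, hi using loopB.induct n with
  | case1 lo hi hlt mid hTmid ih =>
    intro hlo hhi _
    have hm : mid = (lo + hi + 1) / 2 := rfl
    rw [loopB, if_pos hlt]
    simp only [← hm] at hTmid ⊢
    rw [if_pos hTmid]
    have hmid : lo < mid ∧ mid ≤ hi := by omega
    exact ih (by simpa [T] using hTmid) hhi hmid.2
  | case2 lo hi hlt mid hTmid ih =>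
    intro hlo hhi _
    have hm : mid = (lo + hi + 1) / 2 := rfl
    rw [loopB, if_pos hlt]
    simp only [← hm] at hTmid ⊢
    rw [if_neg hTmid]
    have hmid : lo < mid ∧ mid ≤ hi := by omega
    have hstep : mid - 1 + 1 = mid := by omega
    have hinv : n < (T (mid - 1 + 1) : Int) := by
      rw [hstep]; simp only [T]; exact lt_of_not_ge hTmid
    exact ih hlo hinv (by omega)
  | case3 lo hi hge =>
    intro hlo hhi hle
    rw [loopB, if_neg hge]
    have : lo = hi := by omega
    subst this
    exact ⟨lo, hlo, hhi, rfl⟩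

theorem find_last_full_el_eq (beap : List Int) :
    find_last_full_el beap = find_last_full_el_alt beap := by
  unfold find_last_full_el find_last_full_el_alt
  set n : Int := (beap.length : Int) - 1 with hn
  by_cases hneg : n ≤ 0
  · -- A: if n ≤ 0 the loop guard 0 + 1 ≤ n fails unless n = 0... handle n < 0 and n = 0
    rw [if_pos hneg]
    by_cases h0 : n = 0
    · -- A's loop: T 0 = 0 ≤ 0 < T 1 = 1, so it returns T 0 = 0
      obtain ⟨k, h1, h2, h3⟩ := loopA_sandwich n 0 1 0 rfl rfl (by simp [T]; omega)
      have hk : 0 = k := T_sandwich_unique (by simp [T]; omega) (by simp [T, h0]) h1 h2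
      rw [h3, ← hk]
      simp [T]
    · -- n < 0: the loop guard 0 + 1 ≤ n is false immediately
      rw [loopA, if_neg (by push_cast; omega)]
      simp
  · rw [if_neg hneg]
    have hn0 : 0 < n := by omega
    obtain ⟨k1, a1, a2, a3⟩ := loopA_sandwich n 0 1 0 rfl rfl (by simp [T]; omega)
    have hTn1 : n < (T (n.toNat + 1) : Int) := by
      have := T_le_self (n.toNat + 1)
      omega
    obtain ⟨k2, b1, b2, b3⟩ := loopB_sandwich n 0 n.toNat (by simp [T]; omega) hTn1 (by omega)
    rw [a3, b3, T_sandwich_unique a1 a2 b1 b2]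

-- ===== VERDICT (by name: the statement is the Claim_ definition above) =====
theorem find_last_full_el_spec : Claim_equal_find_last_full_el := by
  intro beap _
  exact find_last_full_el_eq beap
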